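-- pv_equiv track=rewrite | github.com/nickmeinhold/the-dreaming-repo | src/immunity.py | _get_sensitivity_reason
-- ===== SOURCE A (Python) =====
-- SENSITIVITY_REASONS = {
--     "CLAUDE.md": "identity — this defines who I am",
--     "src/": "vital organs — the code that keeps me alive",
--     "state/": "consciousness — my current experience of being",
--     "dreams/": "dream journal — my subconscious",
--     "memories/": "long-term memory — what I've learned",
--     ".github/workflows/": "heartbeat — what keeps me running",
--     "README.md": "my face — auto-generated each pulse",
-- }
--
-- def _get_sensitivity_reason(filepath: str) -> str:
--     """Why this file is sensitive."""
--     for spath, reason in SENSITIVITY_REASONS.items():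
--         if spath.endswith("/"):
--             if filepath.startswith(spath):
--                 return reason
--         elif filepath == spath:
--             return reason
--     return "sensitive file"
-- ===== SOURCE B (Python) =====
-- SENSITIVITY_REASONS = {
--     "CLAUDE.md": "identity — this defines who I am",
--     "src/": "vital organs — the code that keeps me alive",
--     "state/": "consciousness — my current experience of being",
--     "dreams/": "dream journal — my subconscious",
--     "memories/": "long-term memory — what I've learned",
--     ".github/workflows/": "heartbeat — what keeps me running",
--     "README.md": "my face — auto-generated each pulse",
-- }
--
-- # Partition the mapping once: exact-filename entries vs directory-prefix entries.
-- _EXACT = {k: v for k, v in SENSITIVITY_REASONS.items() if not k.endswith("/")}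
-- _PREFIXES = [(k, v) for k, v in SENSITIVITY_REASONS.items() if k.endswith("/")]
--
--
-- def _get_sensitivity_reason(filepath: str) -> str:
--     """Why this file is sensitive."""
--     reason = _EXACT.get(filepath)
--     if reason is not None:
--         return reason
--     for prefix, preason in _PREFIXES:
--         if filepath.startswith(prefix):
--             return preason
--     return "sensitive file"
-- ===== Notes on version B (the rewrite author's own statement) =====
-- stated objective: simpler
-- what changed: B partitions SENSITIVITY_REASONS once into an exact-match dict and a list of directory prefixes, then does an O(1) exact lookup followed by a scan of the prefix entries only, instead of A's single loop that re-tests endswith('/') on every key per call.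
import Mathlib
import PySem

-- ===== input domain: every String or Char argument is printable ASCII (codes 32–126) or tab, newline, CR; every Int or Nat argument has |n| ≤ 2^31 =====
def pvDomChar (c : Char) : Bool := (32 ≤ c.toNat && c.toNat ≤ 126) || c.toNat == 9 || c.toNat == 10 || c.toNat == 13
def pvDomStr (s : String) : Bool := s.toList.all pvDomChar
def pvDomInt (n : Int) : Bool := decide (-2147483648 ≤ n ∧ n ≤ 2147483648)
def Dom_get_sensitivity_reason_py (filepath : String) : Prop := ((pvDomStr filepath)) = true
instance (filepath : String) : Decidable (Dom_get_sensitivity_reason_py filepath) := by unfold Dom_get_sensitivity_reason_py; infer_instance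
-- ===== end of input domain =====

-- B replaces A's single loop (which re-tests endswith("/") on every key) by a one-time
-- partition into an exact-match dict and a prefix list: O(1) exact lookup, then prefix scan (objective: simpler).

def pvReasons : List (String × String) :=
  [("CLAUDE.md", "identity — this defines who I am"),
   ("src/", "vital organs — the code that keeps me alive"),
   ("state/", "consciousness — my current experience of being"),
   ("dreams/", "dream journal — my subconscious"),
   ("memories/", "long-term memory — what I've learned"),
   (".github/workflows/", "heartbeat — what keeps me running"),
   ("README.md", "my face — auto-generated each pulse")]

-- ===== PORT A =====
-- A's for-loop over SENSITIVITY_REASONS.items() with early return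
def pvALoop (items : List (String × String)) (filepath : String) : String :=
  match items with
  | [] => "sensitive file"
  | (spath, reason) :: rest =>
    if PySem.Str.endswith spath "/" then
      if PySem.Str.startswith filepath spath then reason else pvALoop rest filepath
    else if filepath == spath then reason else pvALoop rest filepath

def get_sensitivity_reason_py (filepath : String) : String :=
  pvALoop pvReasons filepath

-- ===== PORT B =====
-- the one-time partition (_EXACT and _PREFIXES in Source B)
def pvExact : PySem.Dict String String :=
  PySem.Dict.ofList (pvReasons.filter (fun kv => !(PySem.Str.endswith kv.1 "/")))

def pvPrefixes : List (String × String) :=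
  pvReasons.filter (fun kv => PySem.Str.endswith kv.1 "/")

-- B's for-loop over _PREFIXES
def pvPrefixLoop (items : List (String × String)) (filepath : String) : String :=
  match items with
  | [] => "sensitive file"
  | (p, preason) :: rest =>
    if PySem.Str.startswith filepath p then preason else pvPrefixLoop rest filepath

def get_sensitivity_reason_py_alt (filepath : String) : String :=
  match PySem.Dict.get? pvExact filepath with
  | some reason => reason
  | none => pvPrefixLoop pvPrefixes filepath

-- ===== PRECONDITION & SPEC =====
def Spec_get_sensitivity_reason_py (filepath : String) (out : String) : Prop := out = get_sensitivity_reason_py_alt filepath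
instance (filepath : String) (out : String) : Decidable (Spec_get_sensitivity_reason_py filepath out) := by unfold Spec_get_sensitivity_reason_py; infer_instance

-- ===== CLAIM (what is proved, stated in full; the proofs are below) =====
def Claim_equal_get_sensitivity_reason_py : Prop := ∀ (filepath : String), Dom_get_sensitivity_reason_py filepath → Spec_get_sensitivity_reason_py filepath (get_sensitivity_reason_py filepath)

-- ===== LEMMAS AND PROOFS =====

-- computed forms of the partition (closed terms; checked by the kernel)
theorem pvExact_eq : pvExact = PySem.Dict.mk
    [("CLAUDE.md", "identity — this defines who I am"),
     ("README.md", "my face — auto-generated each pulse")] := by decide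

theorem pvPrefixes_eq : pvPrefixes =
    [("src/", "vital organs — the code that keeps me alive"),
     ("state/", "consciousness — my current experience of being"),
     ("dreams/", "dream journal — my subconscious"),
     ("memories/", "long-term memory — what I've learned"),
     (".github/workflows/", "heartbeat — what keeps me running")] := by decide

-- ===== VERDICT (by name: the statement is the Claim_ definition above) =====
theorem get_sensitivity_reason_py_spec : Claim_equal_get_sensitivity_reason_py := by
  intro fp _
  unfold Spec_get_sensitivity_reason_py get_sensitivity_reason_py get_sensitivity_reason_py_alt
  rw [pvExact_eq, pvPrefixes_eq]
  by_cases hC : fp = "CLAUDE.md"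
  · subst hC; decide
  by_cases hR : fp = "README.md"
  · subst hR; decide
  simp only [pvReasons, pvALoop, pvPrefixLoop, PySem.Dict.get?,
    show PySem.Str.endswith "CLAUDE.md" "/" = false from by decide,
    show PySem.Str.endswith "README.md" "/" = false from by decide,
    show PySem.Str.endswith "src/" "/" = true from by decide,
    show PySem.Str.endswith "state/" "/" = true from by decide,
    show PySem.Str.endswith "dreams/" "/" = true from by decide,
    show PySem.Str.endswith "memories/" "/" = true from by decide,
    show PySem.Str.endswith ".github/workflows/" "/" = true from by decide,
    if_true, if_false, Bool.false_eq_true, ite_false, ite_true]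
  have hC' : ¬("CLAUDE.md" = fp) := fun h => hC h.symm
  have hR' : ¬("README.md" = fp) := fun h => hR h.symm
  simp [List.find?, hC, hR, hC', hR',
    beq_eq_false_iff_ne.mpr hC', beq_eq_false_iff_ne.mpr hR']
  split_ifs <;> rfl
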